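-- pv_equiv track=rewrite | github.com/TOBB-University-Master/CitationIntentClassifier | experiment/experiment_0_evaluate_majority_vote.py | discover_model_prefixes
-- ===== SOURCE A (Python) =====
-- def discover_model_prefixes(columns, labels):
--     """
--     Sütun isimlerini tarar ve etiketlerden (labels) yola çıkarak
--     benzersiz model prefix'lerini bulur.
--
--     Örnek: 'bert-base_1_background' sütunu için prefix 'bert-base_1' olarak belirlenir.
--     """
--     prefixes = set()
--
--     for col in columns:
--         for label in labels:
--             # Sütun ismi _{label} ile bitiyorsa (örn: _background)
--             suffix = f"_{label}"
--             if col.endswith(suffix):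
--                 # Suffix'i çıkarıp geri kalanı prefix olarak alıyoruz
--                 prefix = col.rsplit(suffix, 1)[0]
--                 prefixes.add(prefix)
--
--     # Sıralı liste döndür (tutarlılık için)
--     return sorted(list(prefixes))
-- ===== SOURCE B (Python) =====
-- def discover_model_prefixes(columns, labels):
--     """Single scan per column: check each underscore position against a
--     prebuilt label set instead of testing every label per column."""
--     label_set = set(labels)
--     prefixes = set()
--     for col in columns:
--         for i, ch in enumerate(col):
--             if ch == '_' and col[i + 1:] in label_set:
--                 prefixes.add(col[:i])
--     return sorted(prefixes)
-- ===== Notes on version B (the rewrite author's own statement) =====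
-- stated objective: faster
-- what changed: Instead of testing every label as a '_'-suffix of every column (nested loops with per-label string scans), B builds the label set once and makes a single pass over each column's characters, adding col[:i] whenever position i holds '_' and the tail col[i+1:] is in the set.
import Mathlib
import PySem

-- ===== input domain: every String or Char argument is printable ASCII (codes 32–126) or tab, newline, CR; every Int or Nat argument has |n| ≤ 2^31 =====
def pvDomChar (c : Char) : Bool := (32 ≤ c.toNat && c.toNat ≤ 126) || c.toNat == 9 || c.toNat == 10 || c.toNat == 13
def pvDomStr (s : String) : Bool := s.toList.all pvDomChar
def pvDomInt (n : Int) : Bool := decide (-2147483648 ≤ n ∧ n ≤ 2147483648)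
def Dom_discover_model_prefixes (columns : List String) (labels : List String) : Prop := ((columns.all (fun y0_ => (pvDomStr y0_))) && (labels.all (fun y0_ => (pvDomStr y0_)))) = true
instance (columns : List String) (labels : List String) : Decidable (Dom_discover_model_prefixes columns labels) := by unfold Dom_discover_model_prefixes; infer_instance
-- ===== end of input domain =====

-- B replaces A's inner loop over all labels by a single scan of each column's
-- underscore positions tested against a prebuilt label set (objective: faster).

-- ===== PORT A =====
-- hand port of s.rsplit(sub, 1)[0]: scan split points from the right for the last
-- occurrence of sub; exact for nonempty sub (the only use: sub = "_" + label)
def pvLastSplit (l sub : List Char) : Nat → Option Nat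
  | 0 => if sub.isPrefixOf l then some 0 else none
  | j+1 => if sub.isPrefixOf (l.drop (j+1)) then some (j+1) else pvLastSplit l sub j

def pyRsplit1Head (l sub : List Char) : List Char :=
  match pvLastSplit l sub l.length with
  | some j => l.take j
  | none => l

def discover_model_prefixes (columns : List String) (labels : List String) : List String :=
  let prefixes : PySem.Set String :=
    columns.foldl (fun prefixes col =>
      labels.foldl (fun prefixes label =>
        -- suffix = f"_{label}" inlined
        if PySem.Str.endswith col ("_" ++ label) then
          PySem.Set.add prefixes (String.ofList (pyRsplit1Head col.toList ("_" ++ label).toList))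
        else prefixes) prefixes) PySem.Set.empty
  PySem.List.sorted prefixes (fun x => x) false

-- ===== PORT B =====
def discover_model_prefixes_alt (columns : List String) (labels : List String) : List String :=
  let labelSet : PySem.Set String := PySem.Set.ofList labels
  let prefixes : PySem.Set String :=
    columns.foldl (fun prefixes col =>
      (PySem.List.enumerate col.toList).foldl (fun prefixes p =>
        if p.2 == '_' && PySem.Set.contains labelSet (PySem.Str.slice col (some (p.1 + 1)) none) then
          PySem.Set.add prefixes (PySem.Str.slice col none (some p.1))
        else prefixes) prefixes) PySem.Set.empty
  PySem.List.sorted prefixes (fun x => x) false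

-- ===== PRECONDITION & SPEC =====
def Spec_discover_model_prefixes (columns : List String) (labels : List String) (out : List String) : Prop := out = discover_model_prefixes_alt columns labels
instance (columns : List String) (labels : List String) (out : List String) : Decidable (Spec_discover_model_prefixes columns labels out) := by unfold Spec_discover_model_prefixes; infer_instance

-- ===== CLAIM (what is proved, stated in full; the proofs are below) =====
def Claim_equal_discover_model_prefixes : Prop := ∀ (columns : List String) (labels : List String), Dom_discover_model_prefixes columns labels → Spec_discover_model_prefixes columns labels (discover_model_prefixes columns labels)

-- ===== LEMMAS AND PROOFS =====

-- membership / nodup through a fold whose step's effect on membership is known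
theorem pv_mem_foldl_step {α β : Type} (step : List α → β → List α) (P : β → α → Prop)
    (h : ∀ s b y, y ∈ step s b ↔ y ∈ s ∨ P b y) (l : List β) (s0 : List α) (y : α) :
    y ∈ l.foldl step s0 ↔ y ∈ s0 ∨ ∃ b ∈ l, P b y := by
  induction l generalizing s0 with
  | nil => simp
  | cons b l ih =>
    simp only [List.foldl_cons, ih, h]
    constructor
    · rintro (⟨hy | hP⟩ | ⟨b', hb', hP⟩)
      · exact Or.inl hy
      · exact Or.inr ⟨b, List.mem_cons_self, hP⟩
      · exact Or.inr ⟨b', List.mem_cons_of_mem _ hb', hP⟩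
    · rintro (hy | ⟨b', hb', hP⟩)
      · exact Or.inl (Or.inl hy)
      · rcases List.mem_cons.mp hb' with rfl | hb'
        · exact Or.inl (Or.inr hP)
        · exact Or.inr ⟨b', hb', hP⟩

theorem pv_nodup_foldl_step {α β : Type} (step : List α → β → List α)
    (h : ∀ s b, s.Nodup → (step s b).Nodup) (l : List β) (s0 : List α) (h0 : s0.Nodup) :
    (l.foldl step s0).Nodup := by
  induction l generalizing s0 with
  | nil => exact h0
  | cons b l ih => exact ih _ (h _ _ h0)

-- membership through one conditional Set.add step
theorem pv_mem_addIf {α β : Type} [BEq α] [LawfulBEq α] (c : β → Bool) (f : β → α)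
    (s : PySem.Set α) (b : β) (y : α) :
    y ∈ (if c b then PySem.Set.add s (f b) else s) ↔ y ∈ s ∨ (c b = true ∧ y = f b) := by
  by_cases h : c b = true
  · simp [h, PySem.Set.mem_add]
  · simp [h]

theorem pv_nodup_addIf {α β : Type} [BEq α] [LawfulBEq α] (c : β → Bool) (f : β → α)
    (s : PySem.Set α) (b : β) (hs : s.Nodup) :
    (if c b then PySem.Set.add s (f b) else s).Nodup := by
  by_cases h : c b = true
  · simpa [h] using PySem.Set.nodup_add s (f b) hs
  · simpa [h] using hs

-- pvLastSplit finds the end split point when sub is a suffix of l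
theorem pvLastSplit_of_suffix (l sub : List Char) (hsuf : sub <:+ l) :
    ∀ j, l.length - sub.length ≤ j → j ≤ l.length →
      pvLastSplit l sub j = some (l.length - sub.length) := by
  obtain ⟨t, ht⟩ := hsuf
  have hlen : t.length + sub.length = l.length := by
    rw [← ht]; simp
  have hdrop : l.drop t.length = sub := by
    rw [← ht]; simp
  have htgt : l.length - sub.length = t.length := by omega
  intro j hj1 hj2
  induction j with
  | zero =>
    have h0 : t.length = 0 := by omega
    rw [pvLastSplit]
    have hp : sub.isPrefixOf l = true := by
      rw [List.isPrefixOf_iff_prefix]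
      have hd : l.drop 0 = sub := h0 ▸ hdrop
      simp at hd
      exact hd ▸ List.prefix_refl sub
    simp [hp]; omega
  | succ j ih =>
    rw [pvLastSplit]
    by_cases he : t.length = j + 1
    · have : sub.isPrefixOf (l.drop (j+1)) = true := by
        rw [List.isPrefixOf_iff_prefix, ← he, hdrop]
      simp [this]; omega
    · have hlt : t.length ≤ j := by omega
      have : sub.isPrefixOf (l.drop (j+1)) = false := by
        rw [Bool.eq_false_iff]
        intro hp
        rw [List.isPrefixOf_iff_prefix] at hp
        have := hp.length_le
        simp at this
        omega
      simp [this]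
      rw [htgt] at ih ⊢
      exact ih hlt (by omega)

theorem pyRsplit1Head_of_suffix (l sub : List Char) (hsuf : sub <:+ l) :
    pyRsplit1Head l sub = l.take (l.length - sub.length) := by
  rw [pyRsplit1Head, pvLastSplit_of_suffix l sub hsuf l.length (by omega) le_rfl]

theorem pv_str_eq_of_toList {s t : String} (h : s.toList = t.toList) : s = t := by
  rw [← String.ofList_toList (s := s), h, String.ofList_toList]

-- the crux: for ONE column, "some label matches as _-suffix, prefix = before the suffix"
-- (A's inner loop) is the same relation as "some underscore position whose tail is a label"
-- (B's inner scan)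
theorem pv_key (col : String) (labels : List String) (y : String) :
    (∃ label ∈ labels, PySem.Str.endswith col ("_" ++ label) = true ∧
        y = String.ofList (pyRsplit1Head col.toList ("_" ++ label).toList))
    ↔ (∃ p ∈ PySem.List.enumerate col.toList 0,
        (p.2 == '_' && PySem.Set.contains (PySem.Set.ofList labels)
            (PySem.Str.slice col (some (p.1 + 1)) none)) = true ∧
        y = PySem.Str.slice col none (some p.1)) := by
  constructor
  · rintro ⟨label, hmem, hend, hy⟩
    have hend' : ('_' :: label.toList) <:+ col.toList := by
      have h := (PySem.Chars.endswith_iff col.toList ("_" ++ label).toList).mp (by simpa using hend)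
      simpa using h
    obtain ⟨t, ht⟩ := hend'
    have hlen : t.length + (label.toList.length + 1) = col.toList.length := by
      rw [← ht]; simp
    have hklt : t.length < col.toList.length := by omega
    have hdropk : col.toList.drop t.length = '_' :: label.toList := by
      rw [← ht, List.drop_left]
    have hcons := List.drop_eq_getElem_cons (l := col.toList) hklt
    rw [hdropk] at hcons
    have hget : col.toList[t.length]'hklt = '_' := ((List.cons.injEq _ _ _ _).mp hcons.symm).1
    have hdrop1 : col.toList.drop (t.length + 1) = label.toList :=
      ((List.cons.injEq _ _ _ _).mp hcons.symm).2
    refine ⟨((t.length : Int), col.toList[t.length]'hklt), ?_, ?_, ?_⟩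
    · exact (PySem.List.mem_enumerate_iff _ _ _).mpr ⟨t.length, hklt, by simp⟩
    · have hsl : (PySem.Str.slice col (some ((t.length : Int) + 1)) none) = label := by
        apply pv_str_eq_of_toList
        have hc : ((t.length : Int) + 1) = ((t.length + 1 : Nat) : Int) := by push_cast; ring
        rw [PySem.Str.toList_slice, PySem.Chars.slice_eq_listSlice, hc,
          PySem.List.slice_from_natCast, hdrop1]
      simp only [hsl, hget]
      simp [PySem.Set.mem_ofList, hmem]
    · rw [hy]
      apply pv_str_eq_of_toList
      have hr : pyRsplit1Head col.toList ("_" ++ label).toList = col.toList.take t.length := by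
        have h2 := pyRsplit1Head_of_suffix col.toList ('_' :: label.toList) ⟨t, ht⟩
        have hidx : col.toList.length - ('_' :: label.toList).length = t.length := by
          simp only [List.length_cons]; omega
        simp only [show ("_" ++ label).toList = '_' :: label.toList by simp]
        rw [h2, hidx]
      rw [hr, PySem.Str.toList_slice, PySem.Chars.slice_eq_listSlice, PySem.List.slice_to_natCast]
      simp
  · rintro ⟨p, hp, hcond, hy⟩
    obtain ⟨k, hk, rfl⟩ := (PySem.List.mem_enumerate_iff _ _ _).mp hp
    simp only [Bool.and_eq_true, beq_iff_eq] at hcond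
    obtain ⟨hget, hcont⟩ := hcond
    set s := PySem.Str.slice col (some ((0 : Int) + (k : Int) + 1)) none with hs
    have hmem : s ∈ labels := by
      have h := (PySem.Set.contains_iff _ _).mp hcont
      rw [PySem.Set.mem_ofList] at h
      exact h
    have hsl : s.toList = col.toList.drop (k + 1) := by
      have hc : ((0 : Int) + (k : Int) + 1) = ((k + 1 : Nat) : Int) := by push_cast; ring
      rw [hs, PySem.Str.toList_slice, PySem.Chars.slice_eq_listSlice, hc,
        PySem.List.slice_from_natCast]
    have hdropk : col.toList.drop k = '_' :: s.toList := by
      rw [List.drop_eq_getElem_cons hk, hsl, hget]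
    have hsuf : ('_' :: s.toList) <:+ col.toList := hdropk ▸ List.drop_suffix k col.toList
    refine ⟨s, hmem, ?_, ?_⟩
    · have := (PySem.Chars.endswith_iff col.toList ('_' :: s.toList)).mpr hsuf
      simpa using this
    · rw [hy]
      apply pv_str_eq_of_toList
      have hr : pyRsplit1Head col.toList ("_" ++ s).toList = col.toList.take k := by
        have hlen : s.toList.length = col.toList.length - (k + 1) := by rw [hsl]; simp
        have h2 := pyRsplit1Head_of_suffix col.toList ('_' :: s.toList) hsuf
        have hidx : col.toList.length - ('_' :: s.toList).length = k := by
          simp only [List.length_cons]; omega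
        simp only [show ("_" ++ s).toList = '_' :: s.toList by simp]
        rw [h2, hidx]
      rw [hr, PySem.Str.toList_slice, PySem.Chars.slice_eq_listSlice]
      have hc : ((0 : Int) + (k : Int)) = ((k : Nat) : Int) := by omega
      rw [hc, PySem.List.slice_to_natCast]
      simp

-- membership in A's accumulated set
theorem pv_memA (columns labels : List String) (y : String) :
    y ∈ columns.foldl (fun prefixes col =>
        labels.foldl (fun prefixes label =>
          if PySem.Str.endswith col ("_" ++ label) then
            PySem.Set.add prefixes (String.ofList (pyRsplit1Head col.toList ("_" ++ label).toList))
          else prefixes) prefixes) (PySem.Set.empty (α := String))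
    ↔ ∃ col ∈ columns, ∃ label ∈ labels, PySem.Str.endswith col ("_" ++ label) = true ∧
        y = String.ofList (pyRsplit1Head col.toList ("_" ++ label).toList) := by
  rw [pv_mem_foldl_step _
    (fun col y => ∃ label ∈ labels, PySem.Str.endswith col ("_" ++ label) = true ∧
      y = String.ofList (pyRsplit1Head col.toList ("_" ++ label).toList))
    (fun s col y => by
      rw [pv_mem_foldl_step _
        (fun label y => PySem.Str.endswith col ("_" ++ label) = true ∧
          y = String.ofList (pyRsplit1Head col.toList ("_" ++ label).toList))
        (fun s label y => pv_mem_addIf (fun label => PySem.Str.endswith col ("_" ++ label))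
          (fun label => String.ofList (pyRsplit1Head col.toList ("_" ++ label).toList)) s label y)
        labels s y]) columns _ y]
  simp [PySem.Set.empty]

-- membership in B's accumulated set
theorem pv_memB (columns labels : List String) (y : String) :
    y ∈ columns.foldl (fun prefixes col =>
        (PySem.List.enumerate col.toList).foldl (fun prefixes p =>
          if p.2 == '_' && PySem.Set.contains (PySem.Set.ofList labels)
              (PySem.Str.slice col (some (p.1 + 1)) none) then
            PySem.Set.add prefixes (PySem.Str.slice col none (some p.1))
          else prefixes) prefixes) (PySem.Set.empty (α := String))
    ↔ ∃ col ∈ columns, ∃ p ∈ PySem.List.enumerate col.toList 0,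
        (p.2 == '_' && PySem.Set.contains (PySem.Set.ofList labels)
            (PySem.Str.slice col (some (p.1 + 1)) none)) = true ∧
        y = PySem.Str.slice col none (some p.1) := by
  rw [pv_mem_foldl_step _
    (fun col y => ∃ p ∈ PySem.List.enumerate col.toList 0,
      (p.2 == '_' && PySem.Set.contains (PySem.Set.ofList labels)
          (PySem.Str.slice col (some (p.1 + 1)) none)) = true ∧
      y = PySem.Str.slice col none (some p.1))
    (fun s col y => by
      rw [pv_mem_foldl_step _
        (fun p y => (p.2 == '_' && PySem.Set.contains (PySem.Set.ofList labels)
            (PySem.Str.slice col (some (p.1 + 1)) none)) = true ∧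
          y = PySem.Str.slice col none (some p.1))
        (fun s p y => pv_mem_addIf
          (fun p => p.2 == '_' && PySem.Set.contains (PySem.Set.ofList labels)
            (PySem.Str.slice col (some (p.1 + 1)) none))
          (fun p => PySem.Str.slice col none (some p.1)) s p y)
        (PySem.List.enumerate col.toList 0) s y]) columns _ y]
  simp [PySem.Set.empty]

-- ===== VERDICT (by name: the statement is the Claim_ definition above) =====
theorem discover_model_prefixes_spec : Claim_equal_discover_model_prefixes := by
  intro columns labels _
  show discover_model_prefixes columns labels = discover_model_prefixes_alt columns labels
  simp only [discover_model_prefixes, discover_model_prefixes_alt]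
  apply PySem.List.sorted_eq_sorted_of_perm _ _ _ (fun a b h => h)
  apply (List.perm_ext_iff_of_nodup ?na ?nb).mpr ?mem
  case na =>
    apply pv_nodup_foldl_step
    · intro s col hs
      apply pv_nodup_foldl_step
      · intro s' label hs'
        exact pv_nodup_addIf (fun label => PySem.Str.endswith col ("_" ++ label))
          (fun label => String.ofList (pyRsplit1Head col.toList ("_" ++ label).toList)) s' label hs'
      · exact hs
    · exact List.nodup_nil
  case nb =>
    apply pv_nodup_foldl_step
    · intro s col hs
      apply pv_nodup_foldl_step
      · intro s' p hs'
        exact pv_nodup_addIf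
          (fun p => p.2 == '_' && PySem.Set.contains (PySem.Set.ofList labels)
            (PySem.Str.slice col (some (p.1 + 1)) none))
          (fun p => PySem.Str.slice col none (some p.1)) s' p hs'
      · exact hs
    · exact List.nodup_nil
  case mem =>
    intro y
    rw [pv_memA columns labels y, pv_memB columns labels y]
    constructor
    · rintro ⟨col, hcol, h⟩
      exact ⟨col, hcol, (pv_key col labels y).mp h⟩
    · rintro ⟨col, hcol, h⟩
      exact ⟨col, hcol, (pv_key col labels y).mpr h⟩
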